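-- pv_equiv track=rewrite | github.com/RonaldBuitrago/EjerciciosIA | Sis_Transp.py | buscar_ruta
-- ===== SOURCE A (Python) =====
-- def buscar_ruta(grafo, inicio, fin, ruta_actual=[], tiempo_actual=0):
--     """
--     Busca todas las rutas posibles usando DFS, considerando solo el tiempo.
--     Devuelve una lista de rutas con sus tiempos.
--     """
--     ruta_actual = ruta_actual + [inicio]
--     if inicio == fin:
--         return [(ruta_actual, tiempo_actual)]
--     if inicio not in grafo:
--         return []
--     rutas = []
--     for vecino, tiempo in grafo[inicio]:
--         if vecino not in ruta_actual:
--             nuevas_rutas = buscar_ruta(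
--                 grafo, vecino, fin, ruta_actual, tiempo_actual + tiempo
--             )
--             rutas.extend(nuevas_rutas)
--     return rutas
-- ===== SOURCE B (Python) =====
-- def buscar_ruta(grafo, inicio, fin, ruta_actual=[], tiempo_actual=0):
--     """
--     Enumera todas las rutas simples inicio->fin con su tiempo total,
--     usando un DFS iterativo con una pila explicita de marcos.
--     """
--     resultados = []
--     stack = [(inicio, ruta_actual, tiempo_actual)]
--     while stack:
--         nodo, ruta, tiempo = stack.pop()
--         nueva_ruta = ruta + [nodo]
--         if nodo == fin:
--             resultados.append((nueva_ruta, tiempo))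
--         elif nodo in grafo:
--             for vecino, t in reversed(grafo[nodo]):
--                 if vecino not in nueva_ruta:
--                     stack.append((vecino, nueva_ruta, tiempo + t))
--     return resultados
-- ===== Notes on version B (the rewrite author's own statement) =====
-- stated objective: alternative
-- what changed: Replaces the recursive DFS (which builds each subtree's result list and extends an accumulator per call) by an iterative DFS over an explicit stack of (node, path, time) frames, pushing neighbours in reverse so results appear in the same order.
import Mathlib
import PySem

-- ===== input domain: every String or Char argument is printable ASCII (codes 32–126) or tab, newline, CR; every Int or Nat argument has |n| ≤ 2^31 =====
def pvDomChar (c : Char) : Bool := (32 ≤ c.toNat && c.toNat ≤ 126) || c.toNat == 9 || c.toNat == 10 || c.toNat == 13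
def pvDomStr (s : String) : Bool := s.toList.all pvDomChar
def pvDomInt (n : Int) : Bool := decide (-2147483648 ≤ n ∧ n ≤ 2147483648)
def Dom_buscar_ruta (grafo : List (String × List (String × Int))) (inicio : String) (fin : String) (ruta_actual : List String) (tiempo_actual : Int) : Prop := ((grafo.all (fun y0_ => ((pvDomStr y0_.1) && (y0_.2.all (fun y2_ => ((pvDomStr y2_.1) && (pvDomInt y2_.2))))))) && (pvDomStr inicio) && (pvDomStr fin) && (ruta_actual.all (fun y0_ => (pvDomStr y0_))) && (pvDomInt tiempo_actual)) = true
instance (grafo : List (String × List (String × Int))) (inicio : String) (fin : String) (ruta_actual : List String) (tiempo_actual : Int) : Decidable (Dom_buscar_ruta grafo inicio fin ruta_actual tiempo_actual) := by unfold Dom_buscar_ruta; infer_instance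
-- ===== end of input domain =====

-- B replaces A's recursive DFS by an iterative DFS over an explicit stack of (node, path, time)
-- frames (neighbours pushed in reverse), a different decomposition with the same cost.

-- Termination helpers, cited by both ports' decreasing_by: the set of neighbour names not yet
-- on the current path shrinks on every recursive call / pushed frame.
def pvNames (grafo : List (String × List (String × Int))) : List String :=
  grafo.flatMap (fun p => p.2.map Prod.fst)

def pvMu (grafo : List (String × List (String × Int))) (ruta : List String) : Nat :=
  ((pvNames grafo).toFinset \ ruta.toFinset).card

theorem pv_mem_names_of_lookup {grafo : List (String × List (String × Int))} {k : String}
    {l : List (String × Int)} (h : List.lookup k grafo = some l) {p : String × Int}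
    (hp : p ∈ l) : p.1 ∈ pvNames grafo := by
  induction grafo with
  | nil => simp at h
  | cons q rest ih =>
    by_cases hq : k == q.1
    · rw [show (q :: rest) = ((q.1, q.2) :: rest) from rfl, List.lookup_cons, hq] at h
      injection h with h; subst h
      exact List.mem_flatMap.2 ⟨q, List.mem_cons_self .., List.mem_map.2 ⟨p, hp, rfl⟩⟩
    · rw [show (q :: rest) = ((q.1, q.2) :: rest) from rfl, List.lookup_cons,
        Bool.of_not_eq_true hq] at h
      obtain ⟨e, he, he2⟩ := List.mem_flatMap.1 (ih h)
      exact List.mem_flatMap.2 ⟨e, List.mem_cons_of_mem _ he, he2⟩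

theorem pv_len_of_lookup {grafo : List (String × List (String × Int))} {k : String}
    {l : List (String × Int)} (h : List.lookup k grafo = some l) :
    l.length ≤ (pvNames grafo).length := by
  induction grafo with
  | nil => simp at h
  | cons q rest ih =>
    by_cases hq : k == q.1
    · rw [show (q :: rest) = ((q.1, q.2) :: rest) from rfl, List.lookup_cons, hq] at h
      injection h with h; subst h
      simp [pvNames, List.flatMap_cons]
    · rw [show (q :: rest) = ((q.1, q.2) :: rest) from rfl, List.lookup_cons,
        Bool.of_not_eq_true hq] at h
      calc l.length ≤ (pvNames rest).length := ih h
        _ ≤ (pvNames (q :: rest)).length := by simp [pvNames, List.flatMap_cons]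

theorem pv_mu_lt {grafo : List (String × List (String × Int))} {v : String} {ruta : List String}
    (hv : v ∈ pvNames grafo) (hr : v ∉ ruta) :
    pvMu grafo (ruta ++ [v]) < pvMu grafo ruta := by
  unfold pvMu
  have hset : (ruta ++ [v]).toFinset = insert v ruta.toFinset := by
    rw [List.toFinset_append]; simp
  rw [hset]
  have hmem : v ∈ (pvNames grafo).toFinset \ ruta.toFinset := by simp [hv, hr]
  have he : (pvNames grafo).toFinset \ insert v ruta.toFinset
      = ((pvNames grafo).toFinset \ ruta.toFinset).erase v := by
    ext x; simp [Finset.mem_sdiff, Finset.mem_erase]; tauto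
  rw [he]
  exact Finset.card_erase_lt_of_mem hmem

-- ===== PORT A =====
mutual
def buscar_ruta (grafo : List (String × List (String × Int))) (inicio : String) (fin : String) (ruta_actual : List String) (tiempo_actual : Int) : List (List String × Int) :=
  -- ruta_actual = ruta_actual + [inicio]
  let ruta := ruta_actual ++ [inicio]
  if inicio = fin then [(ruta, tiempo_actual)]
  else
    -- 'inicio not in grafo' followed by 'grafo[inicio]': one first-match lookup
    match h : List.lookup inicio grafo with
    | none => []
    | some vecinos => br_loop grafo fin vecinos ruta tiempo_actual []
        (fun p hp => pv_mem_names_of_lookup h hp)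
termination_by (pvMu grafo (ruta_actual ++ [inicio]), 1, 0)
decreasing_by
  apply Prod.Lex.right
  exact Prod.Lex.left _ _ (by omega)

-- the 'for vecino, tiempo in grafo[inicio]' loop (hv is a termination-only fact, not data)
def br_loop (grafo : List (String × List (String × Int))) (fin : String)
    (vecinos : List (String × Int)) (ruta : List String) (tiempo : Int)
    (rutas : List (List String × Int))
    (hv : ∀ p ∈ vecinos, p.1 ∈ pvNames grafo) : List (List String × Int) :=
  match vecinos with
  | [] => rutas
  | (v, t) :: rest =>
    if v ∉ ruta then
      br_loop grafo fin rest ruta tiempo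
        (rutas ++ buscar_ruta grafo v fin ruta (tiempo + t))
        (fun p hp => hv p (List.mem_cons_of_mem _ hp))
    else
      br_loop grafo fin rest ruta tiempo rutas
        (fun p hp => hv p (List.mem_cons_of_mem _ hp))
termination_by (pvMu grafo ruta, 0, vecinos.length)
decreasing_by
  · apply Prod.Lex.left
    exact pv_mu_lt (hv (v, t) (List.mem_cons_self ..)) (by assumption)
  · apply Prod.Lex.right; apply Prod.Lex.right; simp
  · apply Prod.Lex.right; apply Prod.Lex.right; simp
end

-- ===== PORT B =====
-- stack weight: Σ over frames of (K+1)^(μ frame); popping a frame and pushing its ≤ K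
-- neighbour frames, each of strictly smaller μ, strictly decreases it
def pvW (grafo : List (String × List (String × Int)))
    (stack : List (String × List String × Int)) : Nat :=
  (stack.map (fun f => ((pvNames grafo).length + 1) ^ pvMu grafo (f.2.1 ++ [f.1]))).sum

theorem pv_push_foldl_eq (nueva : List String) (tiempo : Int) (l : List (String × Int))
    (rest : List (String × List String × Int)) :
    l.reverse.foldl
      (fun st vt => if nueva.contains vt.1 then st else (vt.1, nueva, tiempo + vt.2) :: st) rest
    = (l.filter (fun vt => !nueva.contains vt.1)).map
        (fun vt => (vt.1, nueva, tiempo + vt.2)) ++ rest := by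
  induction l with
  | nil => simp
  | cons p tl ih =>
    rw [List.reverse_cons, List.foldl_append, List.foldl_cons, List.foldl_nil]
    by_cases hp : nueva.contains p.1
    · rw [if_pos hp, ih, List.filter_cons]
      have hm : p.1 ∈ nueva := by simpa using hp
      simp [hm]
    · rw [if_neg hp, ih, List.filter_cons]
      have hm : p.1 ∉ nueva := by simpa using hp
      simp [hm]

theorem pv_pvW_push_lt (grafo : List (String × List (String × Int))) (nodo : String)
    (ruta : List String) (tiempo : Int) (vecinos : List (String × Int))
    (rest : List (String × List String × Int))
    (hlk : List.lookup nodo grafo = some vecinos) :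
    pvW grafo
      ((vecinos.filter (fun vt => !(ruta ++ [nodo]).contains vt.1)).map
        (fun vt => (vt.1, ruta ++ [nodo], tiempo + vt.2)) ++ rest)
    < pvW grafo ((nodo, ruta, tiempo) :: rest) := by
  set K := (pvNames grafo).length with hK
  set nueva := ruta ++ [nodo] with hn
  set fl := vecinos.filter (fun vt => !nueva.contains vt.1) with hfl
  have hW : pvW grafo ((fl.map (fun vt => (vt.1, nueva, tiempo + vt.2))) ++ rest)
      = (fl.map (fun vt => (K + 1) ^ pvMu grafo (nueva ++ [vt.1]))).sum + pvW grafo rest := by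
    simp only [pvW, List.map_append, List.map_map, List.sum_append, Function.comp_def, hK]
  have hWc : pvW grafo ((nodo, ruta, tiempo) :: rest)
      = (K + 1) ^ pvMu grafo nueva + pvW grafo rest := by
    simp only [pvW, List.map_cons, List.sum_cons, hK, hn]
  rw [hW, hWc]
  have hsum : (fl.map (fun vt => (K + 1) ^ pvMu grafo (nueva ++ [vt.1]))).sum
      < (K + 1) ^ pvMu grafo nueva := by
    by_cases hne : fl = []
    · rw [hne]; simp
    · have hmu1 : 1 ≤ pvMu grafo nueva := by
        obtain ⟨w, hw⟩ := List.exists_mem_of_ne_nil fl hne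
        have hwf := List.mem_filter.1 (hfl ▸ hw)
        have hws : w.1 ∈ (pvNames grafo).toFinset \ nueva.toFinset := by
          simp only [Finset.mem_sdiff, List.mem_toFinset]
          exact ⟨pv_mem_names_of_lookup hlk hwf.1, by simpa using hwf.2⟩
        have := Finset.card_pos.2 ⟨w.1, hws⟩
        simpa [pvMu] using this
      have hterm : ∀ x ∈ fl.map (fun vt => (K + 1) ^ pvMu grafo (nueva ++ [vt.1])),
          x ≤ (K + 1) ^ (pvMu grafo nueva - 1) := by
        intro x hx
        obtain ⟨vt, hvt, rfl⟩ := List.mem_map.1 hx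
        have hvf := List.mem_filter.1 (hfl ▸ hvt)
        have hlt : pvMu grafo (nueva ++ [vt.1]) < pvMu grafo nueva :=
          pv_mu_lt (pv_mem_names_of_lookup hlk hvf.1) (by simpa using hvf.2)
        exact Nat.pow_le_pow_right (by omega) (by omega)
      calc (fl.map (fun vt => (K + 1) ^ pvMu grafo (nueva ++ [vt.1]))).sum
          ≤ (fl.map (fun vt => (K + 1) ^ pvMu grafo (nueva ++ [vt.1]))).length
              • ((K + 1) ^ (pvMu grafo nueva - 1)) := List.sum_le_card_nsmul _ _ hterm
        _ = (fl.map (fun vt => (K + 1) ^ pvMu grafo (nueva ++ [vt.1]))).length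
              * ((K + 1) ^ (pvMu grafo nueva - 1)) := smul_eq_mul ..
        _ ≤ K * ((K + 1) ^ (pvMu grafo nueva - 1)) := by
            apply Nat.mul_le_mul_right
            calc (fl.map (fun vt => (K + 1) ^ pvMu grafo (nueva ++ [vt.1]))).length
                = fl.length := List.length_map ..
              _ ≤ vecinos.length := hfl ▸ List.length_filter_le _ _
              _ ≤ K := pv_len_of_lookup hlk
        _ < (K + 1) * ((K + 1) ^ (pvMu grafo nueva - 1)) := by
            exact (Nat.mul_lt_mul_right (Nat.pow_pos (by omega))).mpr (by omega)
        _ = (K + 1) ^ (pvMu grafo nueva - 1 + 1) := by ring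
        _ = (K + 1) ^ pvMu grafo nueva := by rw [Nat.sub_add_cancel hmu1]
  omega

def bfs_loop (grafo : List (String × List (String × Int))) (fin : String)
    (stack : List (String × List String × Int))
    (resultados : List (List String × Int)) : List (List String × Int) :=
  match stack with
  | [] => resultados
  | (nodo, ruta, tiempo) :: rest =>
    -- nodo, ruta, tiempo = stack.pop(); nueva_ruta = ruta + [nodo]
    let nueva := ruta ++ [nodo]
    if nodo = fin then bfs_loop grafo fin rest (resultados ++ [(nueva, tiempo)])
    else
      match h : List.lookup nodo grafo with
      | none => bfs_loop grafo fin rest resultados  -- h used by decreasing_by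
      | some vecinos =>
        -- for vecino, t in reversed(grafo[nodo]): push the frame if vecino not in nueva_ruta
        bfs_loop grafo fin
          (vecinos.reverse.foldl
            (fun st vt => if nueva.contains vt.1 then st else (vt.1, nueva, tiempo + vt.2) :: st) rest)
          resultados
termination_by pvW grafo stack
decreasing_by
  · have h1 : pvW grafo ((nodo, ruta, tiempo) :: rest)
        = ((pvNames grafo).length + 1) ^ pvMu grafo (ruta ++ [nodo]) + pvW grafo rest := by
      simp [pvW]
    have h2 := Nat.pow_pos (n := pvMu grafo (ruta ++ [nodo]))
      (show 0 < (pvNames grafo).length + 1 by omega)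
    omega
  · have h1 : pvW grafo ((nodo, ruta, tiempo) :: rest)
        = ((pvNames grafo).length + 1) ^ pvMu grafo (ruta ++ [nodo]) + pvW grafo rest := by
      simp [pvW]
    have h2 := Nat.pow_pos (n := pvMu grafo (ruta ++ [nodo]))
      (show 0 < (pvNames grafo).length + 1 by omega)
    omega
  · simp only [dite_eq_ite]
    rw [pv_push_foldl_eq]
    exact pv_pvW_push_lt grafo nodo ruta tiempo vecinos rest h

def buscar_ruta_alt (grafo : List (String × List (String × Int))) (inicio : String) (fin : String) (ruta_actual : List String) (tiempo_actual : Int) : List (List String × Int) :=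
  -- resultados = []; stack = [(inicio, ruta_actual, tiempo_actual)]; while stack: …
  bfs_loop grafo fin [(inicio, ruta_actual, tiempo_actual)] []

-- ===== PRECONDITION & SPEC =====
def Spec_buscar_ruta (grafo : List (String × List (String × Int))) (inicio : String) (fin : String) (ruta_actual : List String) (tiempo_actual : Int) (out : List (List String × Int)) : Prop := out = buscar_ruta_alt grafo inicio fin ruta_actual tiempo_actual
instance (grafo : List (String × List (String × Int))) (inicio : String) (fin : String) (ruta_actual : List String) (tiempo_actual : Int) (out : List (List String × Int)) : Decidable (Spec_buscar_ruta grafo inicio fin ruta_actual tiempo_actual out) := by unfold Spec_buscar_ruta; infer_instance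

-- ===== CLAIM (what is proved, stated in full; the proofs are below) =====
def Claim_equal_buscar_ruta : Prop := ∀ (grafo : List (String × List (String × Int))) (inicio : String) (fin : String) (ruta_actual : List String) (tiempo_actual : Int), Dom_buscar_ruta grafo inicio fin ruta_actual tiempo_actual → Spec_buscar_ruta grafo inicio fin ruta_actual tiempo_actual (buscar_ruta grafo inicio fin ruta_actual tiempo_actual)

-- ===== LEMMAS AND PROOFS =====

theorem br_loop_eq (grafo : List (String × List (String × Int))) (fin : String)
    (vecinos : List (String × Int)) (ruta : List String) (tiempo : Int)
    (rutas : List (List String × Int)) (hv : ∀ p ∈ vecinos, p.1 ∈ pvNames grafo) :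
    br_loop grafo fin vecinos ruta tiempo rutas hv
      = rutas ++ ((vecinos.filter (fun vt => !ruta.contains vt.1)).map
          (fun vt => buscar_ruta grafo vt.1 fin ruta (tiempo + vt.2))).flatten := by
  induction vecinos generalizing rutas with
  | nil => simp [br_loop]
  | cons p tl ih =>
    rw [br_loop]
    by_cases hp : p.1 ∈ ruta
    · simp [hp, ih]
    · simp [hp, ih]

theorem buscar_unfold (grafo : List (String × List (String × Int))) (inicio fin : String)
    (ruta_actual : List String) (tiempo_actual : Int) :
    buscar_ruta grafo inicio fin ruta_actual tiempo_actual =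
      if inicio = fin then [(ruta_actual ++ [inicio], tiempo_actual)]
      else match List.lookup inicio grafo with
        | none => []
        | some vecinos =>
          ((vecinos.filter (fun vt => !(ruta_actual ++ [inicio]).contains vt.1)).map
            (fun vt => buscar_ruta grafo vt.1 fin (ruta_actual ++ [inicio]) (tiempo_actual + vt.2))).flatten := by
  rw [buscar_ruta]
  by_cases hf : inicio = fin
  · simp [hf]
  · simp only [hf, if_false]
    split
    · next h => rw [h]
    · next vecinos h =>
        conv_rhs => rw [h]
        rw [br_loop_eq]; simp

theorem bfs_loop_eq (grafo : List (String × List (String × Int))) (fin : String) :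
    ∀ (n : Nat) (stack : List (String × List String × Int)) (res : List (List String × Int)),
      pvW grafo stack ≤ n →
      bfs_loop grafo fin stack res
        = res ++ (stack.map (fun f => buscar_ruta grafo f.1 fin f.2.1 f.2.2)).flatten := by
  intro n
  induction n with
  | zero =>
    intro stack res hw
    match stack with
    | [] => simp [bfs_loop]
    | (nodo, ruta, tiempo) :: rest =>
      exfalso
      have h1 : pvW grafo ((nodo, ruta, tiempo) :: rest)
          = ((pvNames grafo).length + 1) ^ pvMu grafo (ruta ++ [nodo]) + pvW grafo rest := by
        simp [pvW]
      have h2 := Nat.pow_pos (n := pvMu grafo (ruta ++ [nodo]))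
        (show 0 < (pvNames grafo).length + 1 by omega)
      omega
  | succ n ih =>
    intro stack res hw
    match stack with
    | [] => simp [bfs_loop]
    | (nodo, ruta, tiempo) :: rest =>
      rw [bfs_loop]
      have hrest : pvW grafo rest ≤ n := by
        have h1 : pvW grafo ((nodo, ruta, tiempo) :: rest)
            = ((pvNames grafo).length + 1) ^ pvMu grafo (ruta ++ [nodo]) + pvW grafo rest := by
          simp [pvW]
        have h2 := Nat.pow_pos (n := pvMu grafo (ruta ++ [nodo]))
          (show 0 < (pvNames grafo).length + 1 by omega)
        omega
      by_cases hf : nodo = fin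
      · simp only [hf, if_true]
        rw [ih _ _ hrest, List.map_cons, List.flatten_cons, buscar_unfold]
        simp
      · simp only [hf, if_false]
        split
        · next hlk =>
          rw [ih _ _ hrest, List.map_cons, List.flatten_cons, buscar_unfold]
          simp [hf, hlk]
        · next vecinos hlk =>
          rw [pv_push_foldl_eq]
          have hw' : pvW grafo
              ((vecinos.filter (fun vt => !(ruta ++ [nodo]).contains vt.1)).map
                (fun vt => (vt.1, ruta ++ [nodo], tiempo + vt.2)) ++ rest) ≤ n := by
            have := pv_pvW_push_lt grafo nodo ruta tiempo vecinos rest hlk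
            omega
          rw [ih _ _ hw', List.map_cons, List.flatten_cons,
            buscar_unfold grafo nodo fin ruta tiempo]
          simp only [hf, if_false, hlk, List.map_append, List.map_map,
            List.flatten_append, Function.comp_def]

-- ===== VERDICT (by name: the statement is the Claim_ definition above) =====
theorem buscar_ruta_spec : Claim_equal_buscar_ruta := by
  intro grafo inicio fin ruta_actual tiempo_actual _
  unfold Spec_buscar_ruta buscar_ruta_alt
  rw [bfs_loop_eq grafo fin (pvW grafo [(inicio, ruta_actual, tiempo_actual)]) _ _ le_rfl]
  simp
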